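-- pv_equiv track=rewrite | github.com/DRovara/yahtzee-extreme-calculator | test_strat.py | threePairsReplacementStrategy
-- ===== SOURCE A (Python) =====
-- def threePairsReplacementStrategy(existing: list[int], new: list[int], throws: int) -> list[int]:
--     existing.sort()
--     new.sort()
--     keep = []
--     for x in new:
--         if existing.count(x) == 1:
--             keep.append(x)
--             continue
--         if existing.count(x) >= 2:
--             continue
--         if existing.count(x) == 0 and new.count(x) >= 2 and keep.count(x) < 2:
--             keep.append(x)
--             continue
--         if existing.count(x) == 0 and len(set(existing + keep)) < 3:
--             keep.append(x)
--             continue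
--     return keep
-- ===== SOURCE B (Python) =====
-- def threePairsReplacementStrategy(existing: list[int], new: list[int], throws: int) -> list[int]:
--     # Run-length merge of the two sorted lists: walk distinct values of `new`
--     # with a pointer into `existing`, decide per VALUE how many copies to keep
--     # by a closed-form count, and emit that run at once.
--     existing.sort()
--     new.sort()
--     distinct = len(set(existing))
--     keep = []
--     ne = len(existing)
--     n = len(new)
--     i = 0  # pointer into existing
--     j = 0  # pointer into new
--     while j < n:
--         x = new[j]
--         j2 = j
--         while j2 < n and new[j2] == x:
--             j2 += 1
--         m = j2 - j                      # multiplicity of x in new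
--         while i < ne and existing[i] < x:
--             i += 1
--         e = 0
--         while i + e < ne and existing[i + e] == x:
--             e += 1                      # multiplicity of x in existing
--         if e == 1:
--             k = m                       # complete a pair with every copy
--         elif e >= 2:
--             k = 0                       # pair already complete
--         elif m >= 2:
--             k = 2 + (m - 2 if distinct + 1 < 3 else 0)
--             distinct += 1
--         else:
--             k = 1 if distinct < 3 else 0
--             distinct += k
--         keep += [x] * k
--         j = j2
--     return keep
-- ===== Notes on version B (the rewrite author's own statement) =====
-- stated objective: faster
-- what changed: Instead of A's per-element pass re-applying the keep/skip rules with repeated list.count scans and set rebuilds, B does a run-length merge of the two sorted lists: it walks the runs of equal values of sorted new with a pointer into sorted existing and decides per distinct value, by a closed-form count formula, how many copies to emit at once.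
import Mathlib
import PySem

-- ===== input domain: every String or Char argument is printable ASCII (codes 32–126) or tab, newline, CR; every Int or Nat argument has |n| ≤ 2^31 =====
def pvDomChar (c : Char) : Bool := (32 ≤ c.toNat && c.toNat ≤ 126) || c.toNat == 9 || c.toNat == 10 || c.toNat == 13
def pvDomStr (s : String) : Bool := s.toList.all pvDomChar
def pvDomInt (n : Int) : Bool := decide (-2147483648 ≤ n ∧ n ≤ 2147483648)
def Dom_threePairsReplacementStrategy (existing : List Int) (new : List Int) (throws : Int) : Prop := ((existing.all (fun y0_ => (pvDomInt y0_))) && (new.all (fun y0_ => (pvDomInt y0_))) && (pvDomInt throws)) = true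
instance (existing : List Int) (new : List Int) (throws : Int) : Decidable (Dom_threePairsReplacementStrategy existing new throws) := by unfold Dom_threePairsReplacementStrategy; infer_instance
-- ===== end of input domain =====

-- B replaces A's per-element rule pass (with repeated list.count scans and set rebuilds) by a
-- run-length merge over the two sorted lists that decides, per distinct value, how many copies
-- to keep with a closed-form count (faster). Both A and B sort `existing` and `new` in place;
-- the equivalence proved is about the return value.


-- ===== PORT A =====
-- the body of A's `for x in new` loop
def pvStepA (existing new keep : List Int) (x : Int) : List Int :=
  if existing.count x = 1 then keep ++ [x]
  else if existing.count x ≥ 2 then keep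
  else if existing.count x = 0 ∧ new.count x ≥ 2 ∧ keep.count x < 2 then keep ++ [x]
  else if existing.count x = 0 ∧ PySem.Set.len (PySem.Set.ofList (existing ++ keep)) < 3 then keep ++ [x]
  else keep

def threePairsReplacementStrategy (existing : List Int) (new : List Int) (throws : Int) : List Int :=
  let existing := PySem.List.sorted existing (fun x => x) false
  let new := PySem.List.sorted new (fun x => x) false
  new.foldl (fun keep x => pvStepA existing new keep x) []

-- ===== PORT B =====
-- B's while loop: walk the runs of equal values of the sorted `new`, with a pointer into the
-- sorted `existing` (the pointer scans are the takeWhile/dropWhile on the remaining suffixes;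
-- exact for the index loops of Source B).
def pvRunB (es : List Int) (ns : List Int) (d : Int) : List Int :=
  match ns with
  | [] => []
  | x :: tl =>
    let m := ((x :: tl).takeWhile (· == x)).length
    let rest := tl.dropWhile (· == x)
    let es' := es.dropWhile (· < x)
    let e := (es'.takeWhile (· == x)).length
    if e = 1 then List.replicate m x ++ pvRunB es' rest d
    else if e ≥ 2 then pvRunB es' rest d
    else if m ≥ 2 then
      List.replicate (2 + (if d + 1 < 3 then m - 2 else 0)) x ++ pvRunB es' rest (d + 1)
    else
      let k := if d < 3 then 1 else 0
      List.replicate k x ++ pvRunB es' rest (d + k)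
termination_by ns.length
decreasing_by
  all_goals simpa using Nat.lt_succ_of_le (List.length_dropWhile_le (· == x) tl)

def threePairsReplacementStrategy_alt (existing : List Int) (new : List Int) (throws : Int) : List Int :=
  let existing := PySem.List.sorted existing (fun x => x) false
  let new := PySem.List.sorted new (fun x => x) false
  pvRunB existing new (PySem.Set.len (PySem.Set.ofList existing))

-- ===== PRECONDITION & SPEC =====
def Spec_threePairsReplacementStrategy (existing : List Int) (new : List Int) (throws : Int) (out : List Int) : Prop := out = threePairsReplacementStrategy_alt existing new throws
instance (existing : List Int) (new : List Int) (throws : Int) (out : List Int) : Decidable (Spec_threePairsReplacementStrategy existing new throws out) := by unfold Spec_threePairsReplacementStrategy; infer_instance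

-- ===== CLAIM (what is proved, stated in full; the proofs are below) =====
def Claim_equal_threePairsReplacementStrategy : Prop := ∀ (existing : List Int) (new : List Int) (throws : Int), Dom_threePairsReplacementStrategy existing new throws → Spec_threePairsReplacementStrategy existing new throws (threePairsReplacementStrategy existing new throws)

-- ===== LEMMAS AND PROOFS =====

-- On a sorted list whose elements are all ≥ x, the x's form the initial run.
lemma pvRunSplit (x : Int) : ∀ (ns : List Int), ns.Pairwise (· ≤ ·) → (∀ y ∈ ns, x ≤ y) →
    ns.takeWhile (· == x) = List.replicate (ns.count x) x ∧ (∀ y ∈ ns.dropWhile (· == x), x < y) := by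
  intro ns
  induction ns with
  | nil => simp
  | cons a tl ih =>
    intro hp hge
    have h1 : ∀ y ∈ tl, a ≤ y := (List.pairwise_cons.mp hp).1
    have h2 : tl.Pairwise (· ≤ ·) := (List.pairwise_cons.mp hp).2
    by_cases hax : a = x
    · subst hax
      have := ih h2 (fun y hy => h1 y hy)
      constructor
      · rw [List.takeWhile_cons_of_pos (by simp), this.1, List.count_cons_self,
          List.replicate_succ]
      · simpa using this.2
    · have hlt : x < a := lt_of_le_of_ne (hge a (by simp)) (fun h => hax h.symm)
      have hcnt : (a :: tl).count x = 0 := by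
        refine List.count_eq_zero.mpr ?_
        intro hmem
        rcases List.mem_cons.mp hmem with h | h
        · exact hax (h.symm)
        · exact absurd (h1 x h) (by omega)
      refine ⟨by simp [hax, hcnt, List.takeWhile_cons, Ne.symm], ?_⟩
      intro y hy
      rw [List.dropWhile_cons_of_neg (by simp [hax])] at hy
      rcases List.mem_cons.mp hy with h | h
      · omega
      · exact lt_of_lt_of_le hlt (h1 y h)

-- dropping the prefix < x does not change counts of values ≥ x
lemma pvDropLtCount (x y : Int) (hxy : x ≤ y) (es : List Int) :
    (es.dropWhile (· < x)).count y = es.count y := by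
  conv_rhs => rw [← List.takeWhile_append_dropWhile (p := fun z => decide (z < x)) (l := es)]
  rw [List.count_append]
  have : (es.takeWhile (· < x)).count y = 0 := by
    refine List.count_eq_zero.mpr ?_
    intro hmem
    have := List.mem_takeWhile_imp hmem
    simp at this; omega
  omega

-- on a sorted list, everything after dropping the prefix < x is ≥ x
lemma pvDropLtGe (x : Int) : ∀ (es : List Int), es.Pairwise (· ≤ ·) →
    ∀ y ∈ es.dropWhile (· < x), x ≤ y := by
  intro es
  induction es with
  | nil => simp
  | cons a tl ih =>
    intro hp y hy
    have h1 : ∀ z ∈ tl, a ≤ z := (List.pairwise_cons.mp hp).1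
    by_cases hax : a < x
    · rw [List.dropWhile_cons_of_pos (by simpa using hax)] at hy
      exact ih (List.pairwise_cons.mp hp).2 y hy
    · rw [List.dropWhile_cons_of_neg (by simpa using hax)] at hy
      rcases List.mem_cons.mp hy with h | h
      · omega
      · exact le_trans (by omega) (h1 y h)

-- appending copies of an already-present element does not change the set
lemma pvOfListRepMem (l : List Int) (x : Int) (h : x ∈ l) :
    ∀ k, PySem.Set.ofList (l ++ List.replicate k x) = PySem.Set.ofList l := by
  intro k
  induction k with
  | zero => simp
  | succ k ih =>
    rw [List.replicate_succ', ← List.append_assoc, PySem.Set.ofList_append_singleton, ih,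
      PySem.Set.add_of_mem (by simpa [PySem.Set.mem_ofList] using h)]

-- appending k ≥ 1 copies of a new element appends it once to the set
lemma pvOfListRepNotMem (l : List Int) (x : Int) (h : x ∉ l) (k : Nat) (hk : 1 ≤ k) :
    PySem.Set.ofList (l ++ List.replicate k x) = PySem.Set.ofList l ++ [x] := by
  obtain ⟨k', rfl⟩ : ∃ k', k = k' + 1 := ⟨k - 1, by omega⟩
  rw [List.replicate_succ, ← List.singleton_append, ← List.append_assoc,
    pvOfListRepMem (l ++ [x]) x (by simp)]
  rw [PySem.Set.ofList_append_singleton,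
    PySem.Set.add_of_not_mem (by simpa [PySem.Set.mem_ofList] using h)]

-- A's loop over a run of x when existing.count x = 1: every copy is kept
lemma pvRL1 (E N : List Int) (x : Int) (hE : E.count x = 1) :
    ∀ (r : Nat) (keep : List Int),
      (List.replicate r x).foldl (pvStepA E N) keep = keep ++ List.replicate r x := by
  intro r
  induction r with
  | zero => simp
  | succ r ih =>
    intro keep
    rw [List.replicate_succ, List.foldl_cons]
    have : pvStepA E N keep x = keep ++ [x] := by simp [pvStepA, hE]
    rw [this, ih, List.append_assoc]
    simp [List.replicate_succ]

-- A's loop over a run of x when existing.count x ≥ 2: nothing is kept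
lemma pvRL2 (E N : List Int) (x : Int) (hE : 2 ≤ E.count x) :
    ∀ (r : Nat) (keep : List Int),
      (List.replicate r x).foldl (pvStepA E N) keep = keep := by
  intro r
  induction r with
  | zero => simp
  | succ r ih =>
    intro keep
    rw [List.replicate_succ, List.foldl_cons]
    have h1 : ¬ E.count x = 1 := by omega
    have : pvStepA E N keep x = keep := by
      simp [pvStepA, h1, hE]
    rw [this, ih]

-- A's loop over the tail of a run of a fresh x once two copies are kept: all or nothing,
-- decided by the distinct-value count
lemma pvRL3 (E N : List Int) (x : Int) (hE : E.count x = 0) :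
    ∀ (r : Nat) (keep : List Int), 2 ≤ keep.count x →
      (List.replicate r x).foldl (pvStepA E N) keep =
        if PySem.Set.len (PySem.Set.ofList (E ++ keep)) < 3 then keep ++ List.replicate r x
        else keep := by
  intro r
  induction r with
  | zero => intro keep _; split <;> simp
  | succ r ih =>
    intro keep hk
    have hxk : x ∈ keep := List.count_pos_iff.mp (by omega)
    have h1 : ¬ E.count x = 1 := by omega
    have h2 : ¬ E.count x ≥ 2 := by omega
    have h3 : ¬ keep.count x < 2 := by omega
    rw [List.replicate_succ, List.foldl_cons]
    by_cases hc : (PySem.Set.ofList (E ++ keep)).length < 3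
    · have hstep : pvStepA E N keep x = keep ++ [x] := by
        simp [pvStepA, PySem.Set.len, h1, h2, h3, hE, hc]
      have hset : PySem.Set.ofList (E ++ (keep ++ [x])) = PySem.Set.ofList (E ++ keep) := by
        rw [← List.append_assoc]
        simpa using pvOfListRepMem (E ++ keep) x (by simp [hxk]) 1
      rw [hstep, ih (keep ++ [x]) (by simp [List.count_append]; omega), hset]
      simp [PySem.Set.len, hc, List.replicate_succ]
    · have hstep : pvStepA E N keep x = keep := by
        simp [pvStepA, PySem.Set.len, h1, h2, h3, hE, hc]
      rw [hstep, ih keep hk]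
      simp [PySem.Set.len, hc]

-- ===== VERDICT is below; main induction first =====

lemma pvLenAppend (s : List Int) (x : Int) :
    PySem.Set.len (s ++ [x]) = PySem.Set.len s + 1 := by
  simp [PySem.Set.len]

lemma pvMain (E N : List Int) :
    ∀ (fuel : Nat) (ns : List Int), ns.length ≤ fuel →
      ∀ (es keep : List Int) (d : Int),
        ns.Pairwise (· ≤ ·) →
        es.Pairwise (· ≤ ·) →
        (∀ y ∈ ns, N.count y = ns.count y) →
        (∀ y ∈ ns, es.count y = E.count y) →
        (∀ y ∈ ns, keep.count y = 0) →
        PySem.Set.len (PySem.Set.ofList (E ++ keep)) = d →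
        ns.foldl (pvStepA E N) keep = keep ++ pvRunB es ns d := by
  intro fuel
  induction fuel with
  | zero =>
    intro ns hlen es keep d _ _ _ _ _ _
    have : ns = [] := List.eq_nil_of_length_eq_zero (by omega)
    subst this
    simp [pvRunB]
  | succ fuel ih =>
    intro ns hlen es keep d hns hes hN hesc hk hd
    match ns with
    | [] => simp [pvRunB]
    | x :: tl =>
      have hx : ∀ y ∈ tl, x ≤ y := (List.pairwise_cons.mp hns).1
      have htl : tl.Pairwise (· ≤ ·) := (List.pairwise_cons.mp hns).2
      have hhead : ∀ y ∈ x :: tl, x ≤ y := by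
        intro y hy
        rcases List.mem_cons.mp hy with h | h
        · omega
        · exact hx y h
      obtain ⟨htake, hgt0⟩ := pvRunSplit x (x :: tl) hns hhead
      set m := (x :: tl).count x with hm
      have hm1 : 1 ≤ m := by
        rw [hm]
        exact List.count_pos_iff.mpr (by simp)
      set rest := tl.dropWhile (· == x) with hrestdef
      have hdropc : (x :: tl).dropWhile (· == x) = rest := by
        rw [List.dropWhile_cons_of_pos (by simp)]
      have hsplit : x :: tl = List.replicate m x ++ rest := by
        conv_lhs => rw [← List.takeWhile_append_dropWhile (p := fun y => y == x) (l := x :: tl)]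
        rw [htake, hdropc]
      have hgt : ∀ y ∈ rest, x < y := by
        intro y hy; exact hgt0 y (by rwa [hdropc])
      -- existing-side pointer
      set es' := es.dropWhile (· < x) with hes'def
      have hes'p : es'.Pairwise (· ≤ ·) := List.Pairwise.sublist (List.dropWhile_sublist _) hes
      have hge' : ∀ y ∈ es', x ≤ y := pvDropLtGe x es hes
      obtain ⟨htakeE, _⟩ := pvRunSplit x es' hes'p hge'
      have heE : (es'.takeWhile (· == x)).length = E.count x := by
        rw [htakeE, List.length_replicate, pvDropLtCount x x le_rfl es]
        exact hesc x (by simp)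
      have hmlen : ((x :: tl).takeWhile (· == x)).length = m := by
        rw [htake, List.length_replicate]
      -- facts for the recursive call
      have hrestlen : rest.length ≤ fuel := by
        have h1 : rest.length ≤ tl.length := List.length_dropWhile_le _ _
        have h2 : tl.length + 1 ≤ fuel + 1 := by simpa using hlen
        omega
      have hrestp : rest.Pairwise (· ≤ ·) := List.Pairwise.sublist (List.dropWhile_sublist _) htl
      have hmem_rest : ∀ y ∈ rest, y ∈ x :: tl := by
        intro y hy
        exact List.mem_cons_of_mem x ((List.dropWhile_sublist _).mem hy)
      have hN_rest : ∀ y ∈ rest, N.count y = rest.count y := by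
        intro y hy
        have hyx : y ≠ x := by have := hgt y hy; omega
        rw [hN y (hmem_rest y hy), hsplit, List.count_append, List.count_replicate]
        simp [Ne.symm hyx]
      have hesc_rest : ∀ y ∈ rest, es'.count y = E.count y := by
        intro y hy
        rw [pvDropLtCount x y (le_of_lt (hgt y hy)) es]
        exact hesc y (hmem_rest y hy)
      have hkx : keep.count x = 0 := hk x (by simp)
      have hNx : N.count x = m := by rw [hN x (by simp), hm]
      -- rewrite both sides
      conv_lhs => rw [hsplit, List.foldl_append]
      rw [pvRunB, hmlen, heE, ← hrestdef, ← hes'def]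
      by_cases hc1 : E.count x = 1
      · -- pair can be completed: keep every copy
        rw [pvRL1 E N x hc1 m keep]
        have hxE : x ∈ E := List.count_pos_iff.mp (by omega)
        have hset : PySem.Set.ofList (E ++ (keep ++ List.replicate m x))
            = PySem.Set.ofList (E ++ keep) := by
          rw [← List.append_assoc]
          exact pvOfListRepMem (E ++ keep) x (by simp [hxE]) m
        rw [ih rest hrestlen es' (keep ++ List.replicate m x) d hrestp hes'p hN_rest hesc_rest
          (by
            intro y hy
            have hyx : y ≠ x := by have := hgt y hy; omega
            rw [List.count_append, List.count_replicate, hk y (hmem_rest y hy)]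
            simp [Ne.symm hyx])
          (by rw [hset, hd])]
        simp [hc1, List.append_assoc]
      · by_cases hc2 : 2 ≤ E.count x
        · -- pair already complete: keep nothing
          rw [pvRL2 E N x hc2 m keep]
          rw [ih rest hrestlen es' keep d hrestp hes'p hN_rest hesc_rest
            (fun y hy => hk y (hmem_rest y hy)) hd]
          have : ¬ E.count x = 1 := hc1
          simp [this, hc2]
        · -- fresh value
          have hc0 : E.count x = 0 := by omega
          have hxEK : x ∉ E ++ keep := by
            simp only [List.mem_append]
            rintro (h | h)
            · exact List.count_eq_zero.mp hc0 h
            · exact List.count_eq_zero.mp hkx h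
          have hkeep' : ∀ (K : Nat), 1 ≤ K →
              PySem.Set.len (PySem.Set.ofList (E ++ (keep ++ List.replicate K x))) = d + 1 := by
            intro K hK
            rw [← List.append_assoc, pvOfListRepNotMem (E ++ keep) x hxEK K hK,
              pvLenAppend, hd]
          by_cases hm2 : 2 ≤ m
          · -- at least a pair among the new dice: keep two, then all-or-nothing
            have hrep : List.replicate m x = x :: x :: List.replicate (m - 2) x := by
              have h2 : m = (m - 2) + 1 + 1 := by omega
              conv_lhs => rw [h2]
              rw [List.replicate_succ, List.replicate_succ]
            have hstep1 : pvStepA E N keep x = keep ++ [x] := by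
              have : ¬ E.count x = 1 := hc1
              simp [pvStepA, this, hc2, hc0, hNx, hm2, hkx]
            have hstep2 : pvStepA E N (keep ++ [x]) x = keep ++ [x] ++ [x] := by
              have h1 : ¬ E.count x = 1 := hc1
              simp [pvStepA, h1, hc2, hc0, hNx, hm2, hkx, List.count_append]
            have hkeep2 : keep ++ [x] ++ [x] = keep ++ List.replicate 2 x := by
              simp [List.replicate_succ]
            have hcnt2 : 2 ≤ (keep ++ List.replicate 2 x).count x := by
              simp [List.count_append]
            rw [hrep, List.foldl_cons, hstep1, List.foldl_cons, hstep2, hkeep2,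
              pvRL3 E N x hc0 (m - 2) (keep ++ List.replicate 2 x) hcnt2]
            rw [hkeep' 2 (by omega)]
            have hnotm1 : ¬ m = 1 := by omega  -- branch selection in pvRunB
            set K : Nat := 2 + (if d + 1 < 3 then m - 2 else 0) with hK
            have hfold : (if d + 1 < 3 then keep ++ List.replicate 2 x ++ List.replicate (m - 2) x
                else keep ++ List.replicate 2 x) = keep ++ List.replicate K x := by
              by_cases hcond : d + 1 < 3
              · rw [if_pos hcond, hK, if_pos hcond, List.append_assoc,
                  ← List.replicate_add]
              · rw [if_neg hcond, hK, if_neg hcond]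
            rw [hfold]
            rw [ih rest hrestlen es' (keep ++ List.replicate K x) (d + 1) hrestp hes'p hN_rest
              hesc_rest
              (by
                intro y hy
                have hyx : y ≠ x := by have := hgt y hy; omega
                rw [List.count_append, List.count_replicate, hk y (hmem_rest y hy)]
                simp [Ne.symm hyx])
              (hkeep' K (by omega))]
            have h1 : ¬ E.count x = 1 := hc1
            simp [h1, hc2, hm2, hK, List.append_assoc]
          · -- a single fresh die
            have hmeq : m = 1 := by omega
            have hlenlt : (PySem.Set.ofList (E ++ keep)).length < 3 ↔ d < 3 := by
              rw [← hd]
              simp [PySem.Set.len]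
            have hstep : pvStepA E N keep x
                = keep ++ List.replicate (if d < 3 then 1 else 0) x := by
              have h1 : ¬ E.count x = 1 := hc1
              have hnN : ¬ N.count x ≥ 2 := by omega
              by_cases hcond : d < 3
              · simp [pvStepA, h1, hc2, hc0, hnN, hlenlt.mpr hcond, hcond]
              · have hn : ¬ (PySem.Set.ofList (E ++ keep)).length < 3 := fun h => hcond (hlenlt.mp h)
                simp [pvStepA, h1, hc2, hc0, hnN, hn, hcond]
            rw [hmeq]
            simp only [List.replicate_one, List.foldl_cons, List.foldl_nil]
            rw [hstep]
            have hdnew : PySem.Set.len (PySem.Set.ofList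
                (E ++ (keep ++ List.replicate (if d < 3 then 1 else 0) x)))
                = d + (if d < 3 then 1 else 0) := by
              by_cases hcond : d < 3
              · rw [if_pos hcond, if_pos hcond]
                exact hkeep' 1 (by omega)
              · rw [if_neg hcond, if_neg hcond]
                simpa using hd
            rw [ih rest hrestlen es' (keep ++ List.replicate (if d < 3 then 1 else 0) x)
              (d + (if d < 3 then 1 else 0)) hrestp hes'p hN_rest hesc_rest
              (by
                intro y hy
                have hyx : y ≠ x := by have := hgt y hy; omega
                rw [List.count_append, List.count_replicate, hk y (hmem_rest y hy)]
                simp [Ne.symm hyx])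
              hdnew]
            have h1 : ¬ E.count x = 1 := hc1
            have hnm2 : ¬ m ≥ 2 := hm2
            simp [h1, hc2, hmeq, List.append_assoc]

-- ===== VERDICT (by name: the statement is the Claim_ definition above) =====
theorem threePairsReplacementStrategy_spec : Claim_equal_threePairsReplacementStrategy := by
  intro existing new throws _
  unfold Spec_threePairsReplacementStrategy
  unfold threePairsReplacementStrategy threePairsReplacementStrategy_alt
  have hE : (PySem.List.sorted existing (fun x => x) false).Pairwise (· ≤ ·) := by
    simpa using PySem.List.sorted_pairwise (xs := existing) (key := fun x => x)
  have hN : (PySem.List.sorted new (fun x => x) false).Pairwise (· ≤ ·) := by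
    simpa using PySem.List.sorted_pairwise (xs := new) (key := fun x => x)
  have h := pvMain (PySem.List.sorted existing (fun x => x) false)
    (PySem.List.sorted new (fun x => x) false)
    (PySem.List.sorted new (fun x => x) false).length
    (PySem.List.sorted new (fun x => x) false) (le_refl _)
    (PySem.List.sorted existing (fun x => x) false) []
    (PySem.Set.len (PySem.Set.ofList (PySem.List.sorted existing (fun x => x) false)))
    hN hE (fun _ _ => rfl) (fun _ _ => rfl) (fun _ _ => by simp)
    (by simp)
  simpa using h
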